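-- pv_equiv track=rewrite | github.com/renraeldab/event-summary | html_generator/__main__.py | sort_entities
-- ===== SOURCE A (Python) =====
-- def sort_entities(entities: list[dict]) -> list[dict]:
--     """Group and sort entities."""
--     entity_types = ("Person", "Creature", "Organization", "Location", "Event", "Concept", "Method", "Artifact")
--     sorted_entities = []
--     for entity_type in entity_types:
--         _entities = [entity for entity in entities if entity["type"] == entity_type]
--         if entity_type == "Event":
--             _entities.sort(key=lambda e: e["time"])
--         sorted_entities.extend(_entities)
--     return sorted_entities
-- ===== SOURCE B (Python) =====
-- def sort_entities(entities: list[dict]) -> list[dict]: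
--     """One stable sort of the whole list by a (type-rank, event-time) tuple key."""
--     entity_types = ("Person", "Creature", "Organization", "Location", "Event", "Concept", "Method", "Artifact")
--     rank = {t: i for i, t in enumerate(entity_types)}
--     kept = [e for e in entities if e["type"] in rank]
--     return sorted(kept, key=lambda e: (rank[e["type"]], e["time"] if e["type"] == "Event" else ""))
-- ===== Notes on version B (the rewrite author's own statement) =====
-- stated objective: alternative
-- what changed: A scans the whole entity list once per each of the 8 fixed types and sorts only the Event group; B builds a type->rank dict once, drops unknown types, and does ONE stable sort of the remaining list under the composite key (rank, time-if-Event-else-"").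
import Mathlib
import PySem

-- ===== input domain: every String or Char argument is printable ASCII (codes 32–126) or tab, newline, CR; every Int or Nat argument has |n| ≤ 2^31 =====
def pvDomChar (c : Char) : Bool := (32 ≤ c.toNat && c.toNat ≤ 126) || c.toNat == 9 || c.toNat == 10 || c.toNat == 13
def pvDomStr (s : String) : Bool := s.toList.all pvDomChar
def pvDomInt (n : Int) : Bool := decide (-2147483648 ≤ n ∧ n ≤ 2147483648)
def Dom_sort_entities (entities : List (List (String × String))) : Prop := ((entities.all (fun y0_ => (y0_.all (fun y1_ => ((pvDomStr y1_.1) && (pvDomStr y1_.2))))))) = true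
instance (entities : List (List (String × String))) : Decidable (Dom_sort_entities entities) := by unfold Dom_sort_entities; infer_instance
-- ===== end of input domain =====

-- B replaces A's eight per-type filter passes (plus an Event-only sort) by ONE stable sort of
-- the whole kept list under the composite key (type rank, event time) — alternative
-- decomposition; equal return value.

-- the fixed 8-type tuple, shared verbatim by both programs
def pvEntityTypes : List String :=
  ["Person", "Creature", "Organization", "Location", "Event", "Concept", "Method", "Artifact"]

-- ===== PORT A =====
-- entity["type"] / e["time"] are ported with getD (total); Pre_ below excludes exactly the
-- inputs where the Python raises KeyError (missing "type", or an Event entity missing "time").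
def sort_entities (entities : List (List (String × String))) : List (List (String × String)) :=
  pvEntityTypes.foldl
    (fun sorted_entities entity_type =>
      let _entities := entities.filter
        (fun entity => (PySem.Dict.mk entity).getD "type" "" == entity_type)
      let _entities :=
        if entity_type == "Event" then
          PySem.List.sorted _entities (fun e => (PySem.Dict.mk e).getD "time" "") false
        else _entities
      sorted_entities ++ _entities)
    []

-- ===== PORT B =====
-- rank = {t: i for i, t in enumerate(entity_types)}
def pvRankDict : PySem.Dict String Int :=
  PySem.Dict.mk ((PySem.List.enumerate pvEntityTypes).map (fun p => (p.2, p.1)))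

-- kept = [e for e in entities if e["type"] in rank];
-- sorted(kept, key=lambda e: (rank[e["type"]], e["time"] if e["type"] == "Event" else ""))
def sort_entities_alt (entities : List (List (String × String))) : List (List (String × String)) :=
  let kept := entities.filter
    (fun e => pvRankDict.contains ((PySem.Dict.mk e).getD "type" ""))
  PySem.List.sorted2 kept
    (fun e => pvRankDict.getD ((PySem.Dict.mk e).getD "type" "") 0)
    (fun e => if (PySem.Dict.mk e).getD "type" "" == "Event"
              then (PySem.Dict.mk e).getD "time" "" else "")
    false

-- ===== PRECONDITION & SPEC =====
-- Pre_ excludes exactly the inputs on which the Python A raises KeyError: an entity with no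
-- "type" key, or an entity of type "Event" with no "time" key.
def Pre_sort_entities (entities : List (List (String × String))) : Prop :=
  ∀ e ∈ entities, (PySem.Dict.mk e).contains "type" = true ∧
    ((PySem.Dict.mk e).getD "type" "" = "Event" → (PySem.Dict.mk e).contains "time" = true)
instance (entities : List (List (String × String))) : Decidable (Pre_sort_entities entities) := by unfold Pre_sort_entities; infer_instance

def pvWitness_sort_entities : (List (List (String × String))) :=
  [[("type", "Event"), ("time", "10:00")], [("type", "Person"), ("name", "a")]]

def Spec_sort_entities (entities : List (List (String × String))) (out : List (List (String × String))) : Prop := out = sort_entities_alt entities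
instance (entities : List (List (String × String))) (out : List (List (String × String))) : Decidable (Spec_sort_entities entities out) := by unfold Spec_sort_entities; infer_instance

-- ===== CLAIM (what is proved, stated in full; the proofs are below) =====
def Claim_equal_sort_entities : Prop := ∀ (entities : List (List (String × String))), Dom_sort_entities entities → Pre_sort_entities entities → Spec_sort_entities entities (sort_entities entities)

-- ===== LEMMAS AND PROOFS =====

-- abbreviations for the two dict lookups, the second key and the rank, used only by the proofs
def pvTy (e : List (String × String)) : String := (PySem.Dict.mk e).getD "type" ""
def pvTm (e : List (String × String)) : String := (PySem.Dict.mk e).getD "time" ""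
def pvK2 (e : List (String × String)) : String := if pvTy e == "Event" then pvTm e else ""
def pvR (t : String) : Int := pvRankDict.getD t 0
-- the lexicographic 'before' predicate of B's sorted2 insertion sort, on these keys
def pvBefore (a b : List (String × String)) : Bool :=
  decide (pvR (pvTy a) < pvR (pvTy b)) ||
    (!decide (pvR (pvTy b) < pvR (pvTy a)) && decide (pvK2 a < pvK2 b))
-- A's result, written as a recursion over the type list (one bucket per type, Event sorted)
def pvEmit (ts : List String) (es : List (List (String × String))) : List (List (String × String)) :=
  match ts with
  | [] => []
  | t :: ts =>
    (if t == "Event"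
     then PySem.List.sorted (es.filter (fun e => pvTy e == t)) pvTm false
     else es.filter (fun e => pvTy e == t)) ++ pvEmit ts es

lemma pvA_foldl (ts : List String) (es : List (List (String × String)))
    (acc : List (List (String × String))) :
    ts.foldl
      (fun sorted_entities entity_type =>
        let _entities := es.filter
          (fun entity => (PySem.Dict.mk entity).getD "type" "" == entity_type)
        let _entities :=
          if entity_type == "Event" then
            PySem.List.sorted _entities (fun e => (PySem.Dict.mk e).getD "time" "") false
          else _entities
        sorted_entities ++ _entities) acc
    = acc ++ pvEmit ts es := by
  induction ts generalizing acc with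
  | nil => simp [pvEmit]
  | cons t ts ih =>
    simp only [List.foldl_cons, ih, pvEmit, List.append_assoc]
    rfl

lemma pv_contains_rank (t : String) :
    pvRankDict.contains t = true ↔ t ∈ pvEntityTypes := by
  simp [pvRankDict, pvEntityTypes, PySem.List.enumerate, PySem.Dict.contains_mk]
  tauto

lemma pv_rank_pairwise : pvEntityTypes.Pairwise (fun a b => pvR a < pvR b) := by
  decide

lemma insertBy_all_before {α : Type} (before : α → α → Bool) (x : α) (m : List α)
    (h : ∀ y ∈ m, before x y = true) :
    PySem.List.insertBy before x m = x :: m := by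
  cases m with
  | nil => rfl
  | cons y ys => simp [PySem.List.insertBy, h y (by simp)]

lemma insertBy_append_right {α : Type} (before : α → α → Bool) (x : α) (l m : List α)
    (h : ∀ y ∈ m, before x y = true) :
    PySem.List.insertBy before x (l ++ m) = PySem.List.insertBy before x l ++ m := by
  induction l with
  | nil => simp [insertBy_all_before before x m h, PySem.List.insertBy]
  | cons y l ih =>
    by_cases hy : before x y
    · simp [PySem.List.insertBy, hy]
    · simp [PySem.List.insertBy, hy, ih]

lemma insertBy_append_left {α : Type} (before : α → α → Bool) (x : α) (l m : List α)
    (h : ∀ y ∈ l, before x y = false) :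
    PySem.List.insertBy before x (l ++ m) = l ++ PySem.List.insertBy before x m := by
  induction l with
  | nil => simp
  | cons y l ih =>
    have hy := h y (by simp)
    simp [PySem.List.insertBy, hy, ih (fun z hz => h z (by simp [hz]))]

lemma insertBy_congr {α : Type} (before before' : α → α → Bool) (x : α) (l : List α)
    (h : ∀ y ∈ l, before x y = before' x y) :
    PySem.List.insertBy before x l = PySem.List.insertBy before' x l := by
  induction l with
  | nil => rfl
  | cons y l ih =>
    have hy := h y (by simp)
    by_cases hb : before' x y
    · simp [PySem.List.insertBy, hy, hb]
    · simp [PySem.List.insertBy, hy, hb, ih (fun z hz => h z (by simp [hz]))]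

lemma mem_pvEmit {y : List (String × String)} {ts : List String}
    {es : List (List (String × String))} (h : y ∈ pvEmit ts es) : pvTy y ∈ ts := by
  induction ts with
  | nil => simp [pvEmit] at h
  | cons t ts ih =>
    simp only [pvEmit, List.mem_append] at h
    rcases h with h | h
    · split at h
      · rw [PySem.List.mem_sorted] at h
        have := (List.mem_filter.mp h).2
        simp at this
        simp [this]
      · have := (List.mem_filter.mp h).2
        simp at this
        simp [this]
    · simp [ih h]

lemma pvEmit_not_mem {x : List (String × String)} {ts : List String}
    {es : List (List (String × String))} (h : pvTy x ∉ ts) :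
    pvEmit ts (es ++ [x]) = pvEmit ts es := by
  induction ts with
  | nil => rfl
  | cons t ts ih =>
    have hxt : pvTy x ≠ t := fun he => h (by simp [he])
    have hf : (es ++ [x]).filter (fun e => pvTy e == t) = es.filter (fun e => pvTy e == t) := by
      simp [List.filter_append, hxt]
    simp only [pvEmit, hf, ih (fun he => h (by simp [he]))]

lemma pv_step (ts : List String) (hts : ts.Pairwise (fun a b => pvR a < pvR b))
    (x : List (String × String)) (hx : pvTy x ∈ ts)
    (es : List (List (String × String))) :
    PySem.List.insertBy pvBefore x (pvEmit ts es) = pvEmit ts (es ++ [x]) := by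
  induction ts with
  | nil => simp at hx
  | cons t ts ih =>
    rw [List.pairwise_cons] at hts
    obtain ⟨ht, hts'⟩ := hts
    by_cases hxt : pvTy x = t
    · -- x lands at the right place in this bucket
      have hnotmem : pvTy x ∉ ts := fun hmem => by
        have := ht _ hmem
        rw [hxt] at this
        exact lt_irrefl _ this
      have hrest : ∀ y ∈ pvEmit ts es, pvBefore x y = true := by
        intro y hy
        have hlt : pvR (pvTy x) < pvR (pvTy y) := hxt ▸ ht _ (mem_pvEmit hy)
        simp [pvBefore, hlt]
      rw [pvEmit, pvEmit, insertBy_append_right _ _ _ _ hrest, pvEmit_not_mem hnotmem]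
      congr 1
      have hfx : (es ++ [x]).filter (fun e => pvTy e == t)
          = es.filter (fun e => pvTy e == t) ++ [x] := by
        simp [List.filter_append, hxt]
      by_cases hev : t = "Event"
      · have hkx : pvK2 x = pvTm x := by simp [pvK2, hxt, hev]
        have hcong : ∀ y ∈ PySem.List.sorted (es.filter (fun e => pvTy e == t)) pvTm false,
            pvBefore x y = decide (pvTm x < pvTm y) := by
          intro y hy
          rw [PySem.List.mem_sorted] at hy
          have hyt : pvTy y = t := by
            have := (List.mem_filter.mp hy).2; simpa using this
          have hky : pvK2 y = pvTm y := by simp [pvK2, hyt, hev]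
          simp [pvBefore, hxt, hyt, hkx, hky]
        simp only [hev, BEq.rfl, if_true] at *
        rw [insertBy_congr pvBefore (fun a b => decide (pvTm a < pvTm b)) x _ hcong, hfx]
        rw [PySem.List.sorted_eq_foldl_insertBy, PySem.List.sorted_eq_foldl_insertBy,
          List.foldl_append]
        rfl
      · have hall : ∀ y ∈ es.filter (fun e => pvTy e == t), pvBefore x y = false := by
          intro y hy
          have hyt : pvTy y = t := by
            have := (List.mem_filter.mp hy).2; simpa using this
          simp [pvBefore, pvK2, hxt, hyt, hev]
        have hte : (t == "Event") = false := by simp [hev]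
        simp only [hte, Bool.false_eq_true, if_false, hfx]
        rw [PySem.List.insertBy_of_forall_not_before _ _ _ hall]
    · -- x belongs to a later bucket
      have hx' : pvTy x ∈ ts := by rcases List.mem_cons.mp hx with h | h; exact absurd h hxt; exact h
      have hlt : pvR t < pvR (pvTy x) := ht _ hx'
      have hbucket : ∀ y ∈ (if t == "Event"
          then PySem.List.sorted (es.filter (fun e => pvTy e == t)) pvTm false
          else es.filter (fun e => pvTy e == t)), pvBefore x y = false := by
        intro y hy
        have hyt : pvTy y = t := by
          split at hy
          · rw [PySem.List.mem_sorted] at hy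
            have := (List.mem_filter.mp hy).2; simpa using this
          · have := (List.mem_filter.mp hy).2; simpa using this
        have h1 : ¬ pvR (pvTy x) < pvR (pvTy y) := by rw [hyt]; omega
        have h2 : pvR (pvTy y) < pvR (pvTy x) := by rw [hyt]; omega
        simp [pvBefore, h1, h2]
      have hf : (es ++ [x]).filter (fun e => pvTy e == t) = es.filter (fun e => pvTy e == t) := by
        simp [List.filter_append, hxt]
      rw [pvEmit, pvEmit, insertBy_append_left _ _ _ _ hbucket, ih hts' hx', hf]

lemma pv_main (es : List (List (String × String))) :
    (es.filter (fun e => pvRankDict.contains (pvTy e))).foldl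
      (fun acc x => PySem.List.insertBy pvBefore x acc) []
    = pvEmit pvEntityTypes es := by
  induction es using List.reverseRecOn with
  | nil => rfl
  | append_singleton es x ih =>
    rw [List.filter_append]
    by_cases hc : pvRankDict.contains (pvTy x) = true
    · have : List.filter (fun e => pvRankDict.contains (pvTy e)) [x] = [x] := by
        simp [hc]
      rw [this, List.foldl_append, ih]
      exact pv_step pvEntityTypes pv_rank_pairwise x ((pv_contains_rank _).mp hc) es
    · have hnot : pvTy x ∉ pvEntityTypes := fun hm => hc ((pv_contains_rank _).mpr hm)
      have : List.filter (fun e => pvRankDict.contains (pvTy e)) [x] = [] := by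
        simp [Bool.eq_false_iff.mpr hc]
      rw [this, List.append_nil, ih, pvEmit_not_mem hnot]

lemma pv_eq (es : List (List (String × String))) :
    sort_entities es = sort_entities_alt es := by
  have hA : sort_entities es = pvEmit pvEntityTypes es := by
    unfold sort_entities
    simpa using pvA_foldl pvEntityTypes es []
  have hB : sort_entities_alt es
      = (es.filter (fun e => pvRankDict.contains (pvTy e))).foldl
          (fun acc x => PySem.List.insertBy pvBefore x acc) [] := rfl
  rw [hA, hB, pv_main]

-- ===== VERDICT (by name: the statement is the Claim_ definition above) =====
theorem sort_entities_spec : Claim_equal_sort_entities := by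
  intro es _ _
  exact pv_eq es
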